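-- pv_equiv track=rewrite | github.com/Saketh-Chandra/Chanting_Techniques | Chanting Techinques/Source Code/ghanapatha.py | ghanapatha
-- ===== SOURCE A (Python) =====
-- def ghanapatha(s):
--     sm = list(map(str, s.split(" ")))
--     gh = []
--     l = len(sm)
--     x=[]
--     k = l - 1
--
--     for i in range(l):
--         gh = []
--         if i == k - 1:
--             continue
--         if (i == k):
--             gh.append(sm[k])
--             gh.append(sm[k])
--         else:
--             gh.append(sm[(i) % l])
--             gh.append(sm[(i + 1) % l])
--
--             gh.append(sm[(i + 1) % l])
--             gh.append(sm[i % l])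
--
--             gh.append(sm[i % l])
--             gh.append(sm[(i + 1) % l])
--             gh.append(sm[(i + 2) % l])
--
--             gh.append(sm[(i + 2) % l])
--             gh.append(sm[(i + 1) % l])
--             gh.append(sm[i % l])
--
--             gh.append(sm[i % l])
--             gh.append(sm[(i + 1) % l])
--             gh.append(sm[(i + 2) % l])
--         x.append(gh)
--     return x
-- ===== SOURCE B (Python) =====
-- def ghanapatha(s):
--     words = s.split(" ")
--     out = []
--     while len(words) > 2:
--         pair = words[:2]
--         triple = words[:3]
--         out.append(pair + pair[::-1] + triple + triple[::-1] + triple)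
--         words = words[1:]
--     out.append([words[-1], words[-1]])
--     return out
-- ===== Notes on version B (the rewrite author's own statement) =====
-- stated objective: alternative
-- what changed: Replaced the index loop over range(l) with modular i%l indexing, the i==k-1 skip and the i==k special branch by a head-peeling loop over a shrinking word list that composes each ghana group from a pair and a triple plus their reversals (pair+pair[::-1]+triple+triple[::-1]+triple) instead of 13 explicit element appends.
import Mathlib
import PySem

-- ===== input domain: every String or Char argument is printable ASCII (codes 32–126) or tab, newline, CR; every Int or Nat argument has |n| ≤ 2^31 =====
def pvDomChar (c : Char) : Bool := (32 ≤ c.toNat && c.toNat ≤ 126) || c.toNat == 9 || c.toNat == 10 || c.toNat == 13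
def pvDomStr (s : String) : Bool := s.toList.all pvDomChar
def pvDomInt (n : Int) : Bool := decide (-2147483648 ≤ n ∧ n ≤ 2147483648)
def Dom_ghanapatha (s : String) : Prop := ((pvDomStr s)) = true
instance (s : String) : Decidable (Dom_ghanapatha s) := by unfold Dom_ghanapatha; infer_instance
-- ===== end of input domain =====

-- B replaces A's index loop (modular i%l arithmetic, the i==k-1 skip, the i==k special
-- branch) by a head-peeling loop over a shrinking word list that composes each group
-- from a pair and a triple plus their reversals (objective: alternative).

-- ===== PORT A =====
-- list(map(str, s.split(" "))): str on a str is the identity, so the map is ported as map id.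
def ghanapatha (s : String) : List (List String) :=
  let sm : List String := ((PySem.Str.split? s " ").getD []).map (fun w => w)
  let l : Int := sm.length
  let k : Int := l - 1
  (PySem.List.pyRange 0 l 1).foldl (fun x i =>
    if i = k - 1 then x
    else if i = k then
      x ++ [[PySem.List.pyGetD sm k "", PySem.List.pyGetD sm k ""]]
    else
      x ++ [[PySem.List.pyGetD sm (PySem.Int.mod i l) "",
             PySem.List.pyGetD sm (PySem.Int.mod (i + 1) l) "",
             PySem.List.pyGetD sm (PySem.Int.mod (i + 1) l) "",
             PySem.List.pyGetD sm (PySem.Int.mod i l) "",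
             PySem.List.pyGetD sm (PySem.Int.mod i l) "",
             PySem.List.pyGetD sm (PySem.Int.mod (i + 1) l) "",
             PySem.List.pyGetD sm (PySem.Int.mod (i + 2) l) "",
             PySem.List.pyGetD sm (PySem.Int.mod (i + 2) l) "",
             PySem.List.pyGetD sm (PySem.Int.mod (i + 1) l) "",
             PySem.List.pyGetD sm (PySem.Int.mod i l) "",
             PySem.List.pyGetD sm (PySem.Int.mod i l) "",
             PySem.List.pyGetD sm (PySem.Int.mod (i + 1) l) "",
             PySem.List.pyGetD sm (PySem.Int.mod (i + 2) l) ""]]) []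

-- ===== PORT B =====
-- while len(words) > 2: peel the head, appending pair+pair[::-1]+triple+triple[::-1]+triple;
-- pair[::-1] is ported as List.reverse (exact: PySem.List.slice?_none_none_neg_one).
def ghanaGo (out : List (List String)) (ws : List String) : List (List String) :=
  if h : 2 < ws.length then
    let pair := PySem.List.slice ws none (some 2)
    let triple := PySem.List.slice ws none (some 3)
    ghanaGo (out ++ [pair ++ pair.reverse ++ triple ++ triple.reverse ++ triple])
      (PySem.List.slice ws (some 1) none)
  else
    out ++ [[PySem.List.pyGetD ws (-1) "", PySem.List.pyGetD ws (-1) ""]]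
termination_by ws.length
decreasing_by
  rw [PySem.List.slice_from_one]
  cases ws with
  | nil => simp at h
  | cons a t => simp

def ghanapatha_alt (s : String) : List (List String) :=
  ghanaGo [] ((PySem.Str.split? s " ").getD [])

-- ===== PRECONDITION & SPEC =====
def Spec_ghanapatha (s : String) (out : List (List String)) : Prop := out = ghanapatha_alt s
instance (s : String) (out : List (List String)) : Decidable (Spec_ghanapatha s out) := by unfold Spec_ghanapatha; infer_instance

-- ===== CLAIM (what is proved, stated in full; the proofs are below) =====
def Claim_equal_ghanapatha : Prop := ∀ (s : String), Dom_ghanapatha s → Spec_ghanapatha s (ghanapatha s)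

-- ===== LEMMAS AND PROOFS =====

-- sliding-window normal form both ports are reduced to
def zipForm (sm : List String) : List (List String) :=
  ((sm.zip ((PySem.List.slice sm (some 1) none).zip (PySem.List.slice sm (some 2) none))).map
    (fun t => [t.1, t.2.1, t.2.1, t.1, t.1, t.2.1, t.2.2, t.2.2, t.2.1, t.1,
               t.1, t.2.1, t.2.2]))
    ++ [[PySem.List.pyGetD sm (-1) "", PySem.List.pyGetD sm (-1) ""]]

-- s.split(sep) never returns an empty list of pieces
theorem splitOn_go_ne_nil (sep : List Char) (fuel : Nat) (l cur : List Char)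
    (acc : List (List Char)) : PySem.Chars.splitOn.go sep fuel l cur acc ≠ [] := by
  induction fuel generalizing l cur acc with
  | zero => simp [PySem.Chars.splitOn.go]
  | succ fuel ih =>
    cases l with
    | nil => simp [PySem.Chars.splitOn.go]
    | cons c rest =>
      rw [PySem.Chars.splitOn.go]
      split
      · exact ih _ _ _
      · exact ih _ _ _

theorem split_space_ne_nil (s : String) : (PySem.Str.split? s " ").getD [] ≠ [] := by
  have h : PySem.Str.split? s " " =
      (PySem.Chars.split? s.toList " ".toList).map (fun ps => ps.map String.ofList) := by
    simp [PySem.Str.split?]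
  rw [h]
  simp [PySem.Chars.split?, PySem.Chars.splitOn]
  exact fun hnil => splitOn_go_ne_nil _ _ _ _ _ hnil

-- A's loop equals the sliding-window normal form (sm = the split, always nonempty)
theorem core_eq (sm : List String) (hne : sm ≠ []) :
    (PySem.List.pyRange 0 (sm.length : Int) 1).foldl (fun x i =>
      if i = (sm.length : Int) - 1 - 1 then x
      else if i = (sm.length : Int) - 1 then
        x ++ [[PySem.List.pyGetD sm ((sm.length : Int) - 1) "",
               PySem.List.pyGetD sm ((sm.length : Int) - 1) ""]]
      else
        x ++ [[PySem.List.pyGetD sm (PySem.Int.mod i (sm.length : Int)) "",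
               PySem.List.pyGetD sm (PySem.Int.mod (i + 1) (sm.length : Int)) "",
               PySem.List.pyGetD sm (PySem.Int.mod (i + 1) (sm.length : Int)) "",
               PySem.List.pyGetD sm (PySem.Int.mod i (sm.length : Int)) "",
               PySem.List.pyGetD sm (PySem.Int.mod i (sm.length : Int)) "",
               PySem.List.pyGetD sm (PySem.Int.mod (i + 1) (sm.length : Int)) "",
               PySem.List.pyGetD sm (PySem.Int.mod (i + 2) (sm.length : Int)) "",
               PySem.List.pyGetD sm (PySem.Int.mod (i + 2) (sm.length : Int)) "",
               PySem.List.pyGetD sm (PySem.Int.mod (i + 1) (sm.length : Int)) "",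
               PySem.List.pyGetD sm (PySem.Int.mod i (sm.length : Int)) "",
               PySem.List.pyGetD sm (PySem.Int.mod i (sm.length : Int)) "",
               PySem.List.pyGetD sm (PySem.Int.mod (i + 1) (sm.length : Int)) "",
               PySem.List.pyGetD sm (PySem.Int.mod (i + 2) (sm.length : Int)) ""]]) []
    = zipForm sm := by
  unfold zipForm
  have hn1 : 0 < sm.length := List.length_pos_iff.mpr hne
  have hfun : (fun (x : List (List String)) (i : Int) =>
      if i = (sm.length : Int) - 1 - 1 then x
      else if i = (sm.length : Int) - 1 then
        x ++ [[PySem.List.pyGetD sm ((sm.length : Int) - 1) "",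
               PySem.List.pyGetD sm ((sm.length : Int) - 1) ""]]
      else
        x ++ [[PySem.List.pyGetD sm (PySem.Int.mod i (sm.length : Int)) "",
               PySem.List.pyGetD sm (PySem.Int.mod (i + 1) (sm.length : Int)) "",
               PySem.List.pyGetD sm (PySem.Int.mod (i + 1) (sm.length : Int)) "",
               PySem.List.pyGetD sm (PySem.Int.mod i (sm.length : Int)) "",
               PySem.List.pyGetD sm (PySem.Int.mod i (sm.length : Int)) "",
               PySem.List.pyGetD sm (PySem.Int.mod (i + 1) (sm.length : Int)) "",
               PySem.List.pyGetD sm (PySem.Int.mod (i + 2) (sm.length : Int)) "",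
               PySem.List.pyGetD sm (PySem.Int.mod (i + 2) (sm.length : Int)) "",
               PySem.List.pyGetD sm (PySem.Int.mod (i + 1) (sm.length : Int)) "",
               PySem.List.pyGetD sm (PySem.Int.mod i (sm.length : Int)) "",
               PySem.List.pyGetD sm (PySem.Int.mod i (sm.length : Int)) "",
               PySem.List.pyGetD sm (PySem.Int.mod (i + 1) (sm.length : Int)) "",
               PySem.List.pyGetD sm (PySem.Int.mod (i + 2) (sm.length : Int)) ""]])
    = (fun (x : List (List String)) (i : Int) =>
      if ¬ (i = (sm.length : Int) - 1 - 1) then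
        x ++ [if i = (sm.length : Int) - 1 then
          [PySem.List.pyGetD sm ((sm.length : Int) - 1) "",
           PySem.List.pyGetD sm ((sm.length : Int) - 1) ""]
        else
          [PySem.List.pyGetD sm (PySem.Int.mod i (sm.length : Int)) "",
           PySem.List.pyGetD sm (PySem.Int.mod (i + 1) (sm.length : Int)) "",
           PySem.List.pyGetD sm (PySem.Int.mod (i + 1) (sm.length : Int)) "",
           PySem.List.pyGetD sm (PySem.Int.mod i (sm.length : Int)) "",
           PySem.List.pyGetD sm (PySem.Int.mod i (sm.length : Int)) "",
           PySem.List.pyGetD sm (PySem.Int.mod (i + 1) (sm.length : Int)) "",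
           PySem.List.pyGetD sm (PySem.Int.mod (i + 2) (sm.length : Int)) "",
           PySem.List.pyGetD sm (PySem.Int.mod (i + 2) (sm.length : Int)) "",
           PySem.List.pyGetD sm (PySem.Int.mod (i + 1) (sm.length : Int)) "",
           PySem.List.pyGetD sm (PySem.Int.mod i (sm.length : Int)) "",
           PySem.List.pyGetD sm (PySem.Int.mod i (sm.length : Int)) "",
           PySem.List.pyGetD sm (PySem.Int.mod (i + 1) (sm.length : Int)) "",
           PySem.List.pyGetD sm (PySem.Int.mod (i + 2) (sm.length : Int)) ""]]
      else x) := by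
    funext x i
    by_cases h1 : i = (sm.length : Int) - 1 - 1
    · simp [h1]
    · by_cases h2 : i = (sm.length : Int) - 1 <;> simp [h1, h2]
  rw [hfun, PySem.List.foldl_append_ite]
  rcases Nat.lt_or_ge sm.length 2 with h2 | h2
  · -- sm = [a]
    have h : sm.length = 1 := by omega
    obtain ⟨a, rfl⟩ := List.length_eq_one_iff.mp h
    norm_num [PySem.List.pyRange_one, PySem.List.slice, PySem.Int.mod, PySem.List.pyGetD, PySem.List.pyGet?, PySem.List.pyIdx?]
  · -- 2 ≤ sm.length
    have hl2 : (0:Int) ≤ (sm.length:Int) - 2 := by omega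
    rw [PySem.List.pyRange_one_append 0 ((sm.length:Int)-2) (sm.length:Int) (by omega) (by omega)]
    have e2 : PySem.List.pyRange ((sm.length:Int)-2) (sm.length:Int)
        = [(sm.length:Int)-2, (sm.length:Int)-1] := by
      rw [PySem.List.pyRange_one_cons (by omega), PySem.List.pyRange_one_cons (by omega)]
      have h1 : (sm.length:Int) - 2 + 1 = (sm.length:Int) - 1 := by ring
      have h2 : (sm.length:Int) - 1 + 1 = (sm.length:Int) := by ring
      rw [h1, h2]
      simp
    rw [e2, List.filter_append, List.map_append]
    have hf1 : (PySem.List.pyRange 0 ((sm.length:Int)-2)).filter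
        (fun i => decide ¬(i = (sm.length:Int)-1-1)) = PySem.List.pyRange 0 ((sm.length:Int)-2) := by
      apply List.filter_eq_self.mpr
      intro i hi
      have hm := PySem.List.mem_pyRange_one.mp hi
      simp only [decide_eq_true_eq]
      omega
    rw [hf1]
    have hf2 : ([(sm.length:Int)-2, (sm.length:Int)-1].filter
        (fun i => decide ¬(i = (sm.length:Int)-1-1))) = [(sm.length:Int)-1] := by
      have ha : ((sm.length:Int)-2 = (sm.length:Int)-1-1) := by ring
      have hb : ¬((sm.length:Int)-1 = (sm.length:Int)-1-1) := by omega
      simp [ha, hb]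
    rw [hf2]
    simp only [List.map_cons, List.map_nil, List.nil_append]
    congr 1
    · -- triples
      rw [PySem.List.slice_from sm (by norm_num), PySem.List.slice_from sm (by norm_num)]
      apply List.ext_getElem
      · simp [PySem.List.pyRange_one]
        omega
      · intro j hj1 hj2
        have hjlt : (j:Int) < (sm.length:Int) - 2 := by
          simp [PySem.List.pyRange_one] at hj1
          omega
        have hjn : j + 2 < sm.length := by omega
        simp only [PySem.List.pyRange_one, List.getElem_map, List.getElem_range,
          List.getElem_zip]
        have hz : (0:Int) + (j:Int) = ((j:Nat):Int) := by omega
        rw [hz]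
        have hne1 : ¬ ((j:Int) = (sm.length:Int) - 1 - 1) := by omega
        have hne2 : ¬ ((j:Int) = (sm.length:Int) - 1) := by omega
        rw [if_neg hne2]
        have hm0 : PySem.Int.mod (j:Int) (sm.length:Int) = ((j:Nat):Int) := by
          rw [PySem.Int.mod_eq_emod_of_pos (by omega)]
          exact Int.emod_eq_of_lt (by omega) (by omega)
        have hm1 : PySem.Int.mod ((j:Int) + 1) (sm.length:Int) = ((j+1:Nat):Int) := by
          rw [PySem.Int.mod_eq_emod_of_pos (by omega)]
          rw [Int.emod_eq_of_lt (by omega) (by omega)]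
          push_cast; ring
        have hm2 : PySem.Int.mod ((j:Int) + 2) (sm.length:Int) = ((j+2:Nat):Int) := by
          rw [PySem.Int.mod_eq_emod_of_pos (by omega)]
          rw [Int.emod_eq_of_lt (by omega) (by omega)]
          push_cast; ring
        rw [hm0, hm1, hm2]
        simp only [PySem.List.pyGetD_natCast]
        rw [List.getD_eq_getElem _ _ (by omega), List.getD_eq_getElem _ _ (by omega),
            List.getD_eq_getElem _ _ (by omega)]
        simp only [List.getElem_drop]
        simp [Nat.add_comm]
    · -- last pair
      have hc : ((sm.length:Int)-1) = ((sm.length - 1 : Nat) : Int) := by omega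
      rw [hc, PySem.List.pyGetD_natCast, PySem.List.pyGetD_neg_one sm "" hne]
      rw [List.getLast_eq_getElem, List.getD_eq_getElem _ _ (by omega)]
      simp

-- the accumulator of B's loop factors out
theorem ghanaGo_acc (n : Nat) : ∀ (ws : List String), ws.length ≤ n →
    ∀ (acc : List (List String)), ghanaGo acc ws = acc ++ ghanaGo [] ws := by
  induction n with
  | zero =>
    intro ws hlen acc
    conv_lhs => rw [ghanaGo]
    conv_rhs => rw [ghanaGo]
    have : ¬ 2 < ws.length := by omega
    simp [this]
  | succ n ih =>
    intro ws hlen acc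
    conv_lhs => rw [ghanaGo]
    conv_rhs => rw [ghanaGo]
    by_cases h : 2 < ws.length
    · simp only [h, dif_pos]
      have hlt : (PySem.List.slice ws (some 1) none).length ≤ n := by
        rw [PySem.List.slice_from_one]
        cases ws with
        | nil => simp at h
        | cons a t => simp at hlen ⊢; omega
      conv_lhs => rw [ih _ hlt]
      conv_rhs => rw [ih _ hlt]
      simp
    · simp [h]

-- B's loop computes the sliding-window normal form
theorem ghanaGo_eq_zipForm (n : Nat) : ∀ (ws : List String), ws.length ≤ n → ws ≠ [] →
    ghanaGo [] ws = zipForm ws := by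
  induction n with
  | zero =>
    intro ws hlen hne
    cases ws with
    | nil => exact absurd rfl hne
    | cons a t => simp at hlen
  | succ n ih =>
    intro ws hlen hne
    rw [ghanaGo]
    by_cases h : 2 < ws.length
    · simp only [h, dif_pos]
      obtain ⟨a, b, c, t, rfl⟩ : ∃ a b c t, ws = a :: b :: c :: t := by
        match ws, h with
        | a :: b :: c :: t, _ => exact ⟨a, b, c, t, rfl⟩
      have htl : PySem.List.slice (a :: b :: c :: t) (some 1) none = b :: c :: t := by
        rw [PySem.List.slice_from_one]; rfl
      rw [htl]
      have hrec : ghanaGo [] (b :: c :: t) = zipForm (b :: c :: t) := by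
        apply ih
        · simp at hlen ⊢; omega
        · simp
      rw [ghanaGo_acc (b :: c :: t).length _ le_rfl, hrec]
      have hp : PySem.List.slice (a :: b :: c :: t) none (some 2) = [a, b] := by
        rw [PySem.List.slice_to _ (by norm_num)]; rfl
      have ht3 : PySem.List.slice (a :: b :: c :: t) none (some 3) = [a, b, c] := by
        rw [PySem.List.slice_to _ (by norm_num)]; rfl
      rw [hp, ht3]
      unfold zipForm
      rw [PySem.List.slice_from_one, PySem.List.slice_from_one,
          PySem.List.slice_from _ (by norm_num : (0:Int) ≤ 2),
          PySem.List.slice_from _ (by norm_num : (0:Int) ≤ 2)]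
      simp only [List.tail_cons, List.reverse_cons, List.reverse_nil]
      have hd : List.drop (2:Int).toNat (a :: b :: c :: t) = c :: t := rfl
      have hd' : List.drop (2:Int).toNat (b :: c :: t) = t := rfl
      rw [hd, hd']
      have hlast : PySem.List.pyGetD (a :: b :: c :: t) (-1) ""
          = PySem.List.pyGetD (b :: c :: t) (-1) "" := by
        rw [PySem.List.pyGetD_neg_one _ "" (by simp),
            PySem.List.pyGetD_neg_one _ "" (by simp)]
        rw [List.getLast_cons (by simp)]
      rw [hlast]
      simp [List.zip_cons_cons]
    · -- base: 1 or 2 words; both normal forms are [[last, last]]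
      simp only [h, List.nil_append]
      have hlen2 : ws.length = 1 ∨ ws.length = 2 := by
        have : 0 < ws.length := List.length_pos_iff.mpr hne
        omega
      rcases hlen2 with h1 | h1
      · obtain ⟨a, rfl⟩ := List.length_eq_one_iff.mp h1
        unfold zipForm
        simp [PySem.List.slice_from_one, PySem.List.slice_from _ (by norm_num : (0:Int) ≤ 2)]
      · match ws, h1 with
        | [a, b], _ =>
          unfold zipForm
          simp [PySem.List.slice_from_one, PySem.List.slice_from _ (by norm_num : (0:Int) ≤ 2)]

-- ===== VERDICT (by name: the statement is the Claim_ definition above) =====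
theorem ghanapatha_spec : Claim_equal_ghanapatha := by
  intro s _
  unfold Spec_ghanapatha ghanapatha ghanapatha_alt
  simp only [List.map_id']
  have hne := split_space_ne_nil s
  rw [core_eq _ hne, ghanaGo_eq_zipForm ((PySem.Str.split? s " ").getD []).length _ le_rfl hne]
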